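-- pv_equiv track=rewrite | github.com/CheapScientist/scalable-news-recommendation | src/em_mpi_gpu.py | make_partitions_naive
-- ===== SOURCE A (Python) =====
-- def make_partitions_naive(D, size):
--     """Equal number of docs per rank."""
--     base = D // size
--     rem = D % size
--     parts = []
--     start = 0
--     for r in range(size):
--         extra = 1 if r < rem else 0
--         end = start + base + extra
--         parts.append((start, end))
--         start = end
--     return parts
-- ===== SOURCE B (Python) =====
-- def make_partitions_naive(D, size):
--     """Equal number of docs per rank (closed-form boundaries)."""
--     base, rem = divmod(D, size)
--     return [(r * base + min(r, rem), (r + 1) * base + min(r + 1, rem))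
--             for r in range(size)]
-- ===== Notes on version B (the rewrite author's own statement) =====
-- stated objective: alternative
-- what changed: Replaced the loop-carried start accumulator by the closed-form prefix sum: each boundary is computed independently as r*base + min(r, rem) from a single divmod.
import Mathlib
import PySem

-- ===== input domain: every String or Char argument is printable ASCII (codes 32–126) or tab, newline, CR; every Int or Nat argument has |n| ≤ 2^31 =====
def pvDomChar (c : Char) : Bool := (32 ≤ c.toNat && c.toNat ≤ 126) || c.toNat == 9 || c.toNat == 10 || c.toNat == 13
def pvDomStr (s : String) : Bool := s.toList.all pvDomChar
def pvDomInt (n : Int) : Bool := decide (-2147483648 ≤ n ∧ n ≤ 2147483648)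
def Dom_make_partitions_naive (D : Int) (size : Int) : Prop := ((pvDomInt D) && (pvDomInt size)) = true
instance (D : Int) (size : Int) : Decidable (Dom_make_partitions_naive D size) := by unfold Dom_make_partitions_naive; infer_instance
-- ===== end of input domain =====

-- B replaces A's loop-carried `start` accumulator by the closed-form boundary
-- r*base + min(r, rem) computed independently per rank (objective: alternative).

-- ===== PORT A =====
def make_partitions_naive (D : Int) (size : Int) : List (Int × Int) :=
  let base := PySem.Int.floordiv D size
  let rem := PySem.Int.mod D size
  let st := (PySem.List.pyRange 0 size 1).foldl
    (fun (s : List (Int × Int) × Int) r =>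
      let extra : Int := if r < rem then 1 else 0
      let e := s.2 + base + extra
      (s.1 ++ [(s.2, e)], e))
    ([], 0)
  st.1

-- ===== PORT B =====
def make_partitions_naive_alt (D : Int) (size : Int) : List (Int × Int) :=
  let base := PySem.Int.floordiv D size
  let rem := PySem.Int.mod D size
  (PySem.List.pyRange 0 size 1).map
    (fun r => (r * base + min r rem, (r + 1) * base + min (r + 1) rem))

-- ===== PRECONDITION & SPEC =====
-- Pre_ excludes size = 0, where Python's D // size raises ZeroDivisionError.
def Pre_make_partitions_naive (D : Int) (size : Int) : Prop := size ≠ 0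
instance (D : Int) (size : Int) : Decidable (Pre_make_partitions_naive D size) := by unfold Pre_make_partitions_naive; infer_instance
def pvWitness_make_partitions_naive : Int × Int := (10, 3)

def Spec_make_partitions_naive (D : Int) (size : Int) (out : List (Int × Int)) : Prop := out = make_partitions_naive_alt D size
instance (D : Int) (size : Int) (out : List (Int × Int)) : Decidable (Spec_make_partitions_naive D size out) := by unfold Spec_make_partitions_naive; infer_instance

-- ===== CLAIM (what is proved, stated in full; the proofs are below) =====
def Claim_equal_make_partitions_naive : Prop := ∀ (D : Int) (size : Int), Dom_make_partitions_naive D size → Pre_make_partitions_naive D size → Spec_make_partitions_naive D size (make_partitions_naive D size)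

-- ===== LEMMAS AND PROOFS =====

-- Loop invariant: after processing ranks 0..n-1 the accumulator is the mapped
-- prefix and the running `start` is the closed form n*base + min n rem.
theorem pv_loop (base rem : Int) (hrem : 0 ≤ rem) (n : Nat) :
    (PySem.List.pyRange 0 (n : Int) 1).foldl
      (fun (s : List (Int × Int) × Int) r =>
        let extra : Int := if r < rem then 1 else 0
        let e := s.2 + base + extra
        (s.1 ++ [(s.2, e)], e))
      ([], 0)
    = ((PySem.List.pyRange 0 (n : Int) 1).map
        (fun r => (r * base + min r rem, (r + 1) * base + min (r + 1) rem)),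
       (n : Int) * base + min (n : Int) rem) := by
  induction n with
  | zero => simpa using hrem
  | succ n ih =>
    have hcast : ((n + 1 : Nat) : Int) = (n : Int) + 1 := by push_cast; ring
    rw [hcast, PySem.List.pyRange_one_succ_right (by positivity), List.foldl_append,
        List.map_append, ih]
    have hite : (if (n : Int) < rem then (1:Int) else 0)
        = min ((n : Int) + 1) rem - min (n : Int) rem := by
      split_ifs with h <;> omega
    simp only [List.foldl_cons, List.foldl_nil, List.map_cons, List.map_nil, hite]
    refine Prod.ext ?_ ?_
    · simp only [List.append_cancel_left_eq, List.cons.injEq, and_true, Prod.mk.injEq]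
      exact ⟨trivial, by ring⟩
    · ring

-- ===== VERDICT (by name: the statement is the Claim_ definition above) =====
theorem make_partitions_naive_spec : Claim_equal_make_partitions_naive := by
  intro D size _ hpre
  unfold Spec_make_partitions_naive make_partitions_naive make_partitions_naive_alt
  dsimp only
  rcases lt_trichotomy size 0 with hs | hs | hs
  · simp [PySem.List.pyRange_one_eq_nil (le_of_lt hs)]
  · exact absurd hs hpre
  · have hrem : 0 ≤ PySem.Int.mod D size := by
      rw [PySem.Int.mod_eq_emod_of_pos (a := D) hs]
      exact Int.emod_nonneg D (by omega)
    obtain ⟨n, rfl⟩ : ∃ n : Nat, size = (n : Int) :=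
      ⟨size.toNat, (Int.toNat_of_nonneg hs.le).symm⟩
    rw [pv_loop _ _ hrem]
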